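-- pv_equiv track=rewrite | github.com/JuliannaMali/pp1 | 04-Subroutines/After-class/ex-28.py | f
-- ===== SOURCE A (Python) =====
-- def f(binary_number):
--     x = str(binary_number)
--     list1 = []
--     for n in range(0, len(x)):
--         if x[n] == "0" or x[n] == "1":
--             list1.append(x[n])
--         else:
--             pass
--     if len(list1) == len(x):
--         return True
--     else:
--         return False
-- ===== SOURCE B (Python) =====
-- def f(binary_number):
--     # Purely arithmetic: no string conversion at all. A negative number's
--     # str() starts with '-', so it can never be all '0'/'1'; otherwise every
--     # decimal digit must be 0 or 1, checked by repeated division by 10.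
--     if binary_number < 0:
--         return False
--     n = binary_number
--     while n > 9:
--         if n % 10 > 1:
--             return False
--         n //= 10
--     return n <= 1
-- ===== Notes on version B (the rewrite author's own statement) =====
-- stated objective: alternative
-- what changed: Replaces A's string conversion, per-index loop, list accumulation and length comparison with pure integer arithmetic: reject negatives, then strip decimal digits off with modulo and integer division by ten, failing as soon as a digit exceeds one.
import Mathlib
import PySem

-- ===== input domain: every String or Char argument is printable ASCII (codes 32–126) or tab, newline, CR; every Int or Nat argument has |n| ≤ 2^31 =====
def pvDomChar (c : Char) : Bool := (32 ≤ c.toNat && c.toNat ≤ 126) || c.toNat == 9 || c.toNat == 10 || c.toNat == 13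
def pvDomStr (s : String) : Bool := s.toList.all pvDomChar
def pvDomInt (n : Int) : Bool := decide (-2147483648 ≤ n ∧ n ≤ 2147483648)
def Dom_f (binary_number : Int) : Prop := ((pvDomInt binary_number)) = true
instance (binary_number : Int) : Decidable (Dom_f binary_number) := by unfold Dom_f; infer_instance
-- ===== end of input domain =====

-- B replaces A's string conversion, index loop, list accumulation and length
-- comparison with pure integer arithmetic on the number (objective: alternative).

-- ===== PORT A =====
def f (binary_number : Int) : Bool :=
  let x := (PySem.Int.toStr binary_number).toList
  let list1 := (PySem.List.pyRange 0 (x.length : Int) 1).foldl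
    (fun acc n =>
      if PySem.List.pyGetD x n ' ' = '0' ∨ PySem.List.pyGetD x n ' ' = '1'
      then acc ++ [PySem.List.pyGetD x n ' ']
      else acc) []
  if list1.length = x.length then true else false

-- ===== PORT B =====
-- the 'while n > 9' loop of Source B
def binDigitsLoop (n : Nat) : Bool :=
  if h : 9 < n then
    if n % 10 > 1 then false else binDigitsLoop (n / 10)
  else
    n ≤ 1
decreasing_by exact Nat.div_lt_self (by omega) (by omega)

def f_alt (binary_number : Int) : Bool :=
  if binary_number < 0 then false
  else binDigitsLoop binary_number.toNat

-- ===== PRECONDITION & SPEC =====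
def Spec_f (binary_number : Int) (out : Bool) : Prop := out = f_alt binary_number
instance (binary_number : Int) (out : Bool) : Decidable (Spec_f binary_number out) := by unfold Spec_f; infer_instance

-- ===== CLAIM (what is proved, stated in full; the proofs are below) =====
def Claim_equal_f : Prop := ∀ (binary_number : Int), Dom_f binary_number → Spec_f binary_number (f binary_number)

-- ===== LEMMAS AND PROOFS =====

theorem digitChar_zero_or_one (k : Nat) (hk : k < 10) :
    ((k.digitChar = '0' ∨ k.digitChar = '1') ↔ k ≤ 1) := by
  interval_cases k <;> simp [Nat.digitChar]

theorem toDigitsCore_all_01 (fuel : Nat) :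
    ∀ (m : Nat) (acc : List Char), m < fuel →
      ((∀ c ∈ Nat.toDigitsCore 10 fuel m acc, c = '0' ∨ c = '1') ↔
        (binDigitsLoop m = true ∧ ∀ c ∈ acc, c = '0' ∨ c = '1')) := by
  induction fuel with
  | zero => intro m acc h; omega
  | succ f ih =>
    intro m acc hm
    rw [Nat.toDigitsCore]
    by_cases h0 : m / 10 = 0
    · have hm9 : m ≤ 9 := by omega
      have hmod : m % 10 = m := Nat.mod_eq_of_lt (by omega)
      rw [binDigitsLoop]
      simp only [h0, if_pos, hmod, List.mem_cons, dif_neg (by omega : ¬ 9 < m)]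
      constructor
      · intro h
        exact ⟨by simpa using (digitChar_zero_or_one m (by omega)).mp (h _ (Or.inl rfl)),
          fun c hc => h c (Or.inr hc)⟩
      · rintro ⟨h1, h2⟩ c hc
        rcases hc with rfl | hc
        · exact (digitChar_zero_or_one m (by omega)).mpr (by simpa using h1)
        · exact h2 c hc
    · have hm10 : 10 ≤ m := by
        by_contra h; exact h0 (Nat.div_eq_of_lt (by omega))
      rw [if_neg h0, ih (m / 10) _ (by omega)]
      conv_rhs => rw [binDigitsLoop, dif_pos (by omega : 9 < m)]
      have hmod : m % 10 < 10 := Nat.mod_lt _ (by omega)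
      constructor
      · rintro ⟨h1, h2⟩
        have hd := (digitChar_zero_or_one (m % 10) hmod).mp (h2 _ (List.mem_cons_self ..))
        refine ⟨by simp [Nat.not_lt.mpr hd, h1], fun c hc => h2 c (List.mem_cons_of_mem _ hc)⟩
      · rintro ⟨h1, h2⟩
        by_cases hd : m % 10 > 1
        · simp [hd] at h1
        · simp only [if_neg hd] at h1
          exact ⟨h1, fun c hc => by
            rcases List.mem_cons.mp hc with rfl | hc
            · exact (digitChar_zero_or_one (m % 10) hmod).mpr (by omega)
            · exact h2 c hc⟩

theorem toDigits_all_01 (m : Nat) :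
    (∀ c ∈ Nat.toDigits 10 m, c = '0' ∨ c = '1') ↔ binDigitsLoop m = true := by
  rw [Nat.toDigits, toDigitsCore_all_01 (m + 1) m [] (by omega)]
  simp

-- ===== VERDICT (by name: the statement is the Claim_ definition above) =====
theorem f_spec : Claim_equal_f := by
  intro bn _
  unfold Spec_f f f_alt
  dsimp only
  rw [PySem.List.foldl_pyRange_zero_pyGetD' ((PySem.Int.toStr bn).toList) ' '
        (fun acc c => if c = '0' ∨ c = '1' then acc ++ [c] else acc) [],
      PySem.List.foldl_append_ite_eq_filter]
  simp only [List.nil_append, PySem.Int.toList_toStr, PySem.Int.toChars]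
  by_cases hneg : bn < 0
  · rw [if_pos hneg, if_pos hneg, if_neg]
    intro hlen
    have := (List.length_filter_eq_length_iff ..).mp hlen '-' (List.mem_cons_self ..)
    simp at this
  · rw [if_neg hneg, if_neg hneg]
    by_cases h : binDigitsLoop bn.toNat = true
    · rw [h, if_pos]
      exact (List.length_filter_eq_length_iff ..).mpr (fun c hc => by
        rcases (toDigits_all_01 bn.toNat).mpr h c hc with h0 | h0 <;> simp [h0])
    · rw [Bool.eq_false_iff.mpr h, if_neg]
      intro hlen
      apply h
      apply (toDigits_all_01 bn.toNat).mp
      intro c hc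
      simpa using (List.length_filter_eq_length_iff ..).mp hlen c hc
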